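-- pv_equiv track=rewrite | github.com/Assylzhan-Izbassar/OOP-and-DS | lecture_materials/lecture_12.py | min_hours_to_infect
-- ===== SOURCE A (Python) =====
-- from collections import deque
-- from collections import deque
--
-- def fill_grid(grid):
--     rows, cols = len(grid), len(grid[0])
--     queue = deque()
--     empty = 0
--     # Fill the queue with bacteria starting points
--     for r in range(rows):
--         for c in range(cols):
--             if grid[r][c] == 'B':
--                 queue.append((r, c, 0))  # coordinates + time
--             elif grid[r][c] == '.':
--                 empty += 1
--
--     return rows, cols, queue, empty
--
-- def min_hours_to_infect(grid):
--     rows, cols, queue, empty = fill_grid(grid)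
--
--     directions = [(-1, 0), (1, 0), (0, -1), (0, 1)]
--     max_time = 0
--
--     while queue:
--         r, c, time = queue.popleft()
--         for dr, dc in directions:
--             nr, nc = r + dr, c + dc
--             if 0 <= nr < rows and 0 <= nc < cols and grid[nr][nc] == '.':
--                 grid[nr][nc] = 'B'
--                 empty -= 1
--                 queue.append((nr, nc, time + 1))
--                 max_time = max(max_time, time + 1)
--
--     return max_time if empty == 0 else -1
-- ===== SOURCE B (Python) =====
-- def min_hours_to_infect(grid):
--     # Queue-free rewrite: discrete whole-grid passes instead of a BFS deque.
--     # Mutates grid in place like the original (infected cells become 'B').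
--     rows, cols = len(grid), len(grid[0])
--     empty = sum(1 for r in range(rows) for c in range(cols) if grid[r][c] == '.')
--     hours = 0
--     while True:
--         fresh = [(r, c)
--                  for r in range(rows) for c in range(cols)
--                  if grid[r][c] == '.' and any(
--                      0 <= r + dr < rows and 0 <= c + dc < cols
--                      and grid[r + dr][c + dc] == 'B'
--                      for dr, dc in ((-1, 0), (1, 0), (0, -1), (0, 1)))]
--         if not fresh:
--             return hours if empty == 0 else -1
--         for r, c in fresh:
--             grid[r][c] = 'B'
--         empty -= len(fresh)
--         hours += 1
-- ===== Notes on version B (the rewrite author's own statement) =====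
-- stated objective: alternative
-- what changed: Replaced the BFS deque of time-stamped cells by queue-free discrete passes: each pass rescans the whole grid, buffers every '.' cell with an orthogonal 'B' neighbour, marks them all simultaneously, and counts productive passes as hours.
-- outside the precondition, e.g. on min_hours_to_infect([]): A raises IndexError, B raises IndexError; on min_hours_to_infect([['B', '.'], ['.']]): A raises IndexError, B raises IndexError
import Mathlib
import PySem

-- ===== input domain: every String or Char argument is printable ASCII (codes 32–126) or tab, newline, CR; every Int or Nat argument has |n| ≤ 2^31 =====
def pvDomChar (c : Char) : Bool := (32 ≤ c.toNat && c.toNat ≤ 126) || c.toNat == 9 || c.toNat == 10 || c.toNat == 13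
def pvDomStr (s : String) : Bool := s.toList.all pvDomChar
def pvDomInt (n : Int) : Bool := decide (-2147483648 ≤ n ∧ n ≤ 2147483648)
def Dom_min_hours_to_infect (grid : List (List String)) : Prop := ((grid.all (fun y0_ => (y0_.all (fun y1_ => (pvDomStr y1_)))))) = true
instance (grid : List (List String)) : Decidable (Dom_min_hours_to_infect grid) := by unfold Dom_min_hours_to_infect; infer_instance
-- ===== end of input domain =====

-- B replaces A's BFS deque of time-stamped cells by queue-free whole-grid passes (buffered
-- simultaneous infection, hours = productive passes); equivalence is about the return value
-- (both Pythons mutate `grid` identically; the ports are pure).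

-- shared cell accessors ('grid[r][c]' read/write after an explicit bounds check; out-of-range
-- reads yield "" which never equals "B"/"." — such reads only happen outside Pre_)
def getC (g : List (List String)) (r c : Nat) : String := (g.getD r []).getD c ""
def setC (g : List (List String)) (r c : Nat) (v : String) : List (List String) :=
  g.set r ((g.getD r []).set c v)
def pvDirs : List (Int × Int) := [(-1, 0), (1, 0), (0, -1), (0, 1)]
-- number of "." cells (termination measure for both loops)
def dots (g : List (List String)) : Nat := (g.map (fun row => row.countP (fun s => s == "."))).sum

lemma getC_bounds {g : List (List String)} {r c : Nat} (h : getC g r c ≠ "") :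
    r < g.length ∧ c < (g.getD r []).length := by
  unfold getC at h
  constructor
  · rcases Nat.lt_or_ge r g.length with h1 | h1
    · exact h1
    · rw [List.getD_eq_default _ _ h1] at h
      simp [List.getD] at h
  · rcases Nat.lt_or_ge c (g.getD r []).length with h1 | h1
    · exact h1
    · exact absurd (List.getD_eq_default _ _ h1) h

lemma countP_set_dot : ∀ (l : List String) (c : Nat), c < l.length → l.getD c "" = "." →
    (l.set c "B").countP (fun s => s == ".") + 1 = l.countP (fun s => s == ".") := by
  intro l
  induction l with
  | nil => intro c hc _; simp at hc
  | cons a l ih =>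
    intro c hc hd
    cases c with
    | zero =>
      simp only [List.getD_cons_zero] at hd
      subst hd
      simp
    | succ c =>
      simp only [List.getD_cons_succ] at hd
      simp only [List.set_cons_succ, List.countP_cons]
      have := ih c (by simpa using hc) hd
      omega

lemma countP_set_le : ∀ (l : List String) (c : Nat),
    (l.set c "B").countP (fun s => s == ".") ≤ l.countP (fun s => s == ".") := by
  intro l
  induction l with
  | nil => intro c; simp
  | cons a l ih =>
    intro c
    cases c with
    | zero =>
      simp only [List.set_cons_zero, List.countP_cons]
      split_ifs <;> simp_all
    | succ c =>
      simp only [List.set_cons_succ, List.countP_cons]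
      have := ih c
      omega

lemma dots_setC {g : List (List String)} {r c : Nat} (h : getC g r c = ".") :
    dots (setC g r c "B") + 1 = dots g := by
  have hb := getC_bounds (g := g) (r := r) (c := c) (by rw [h]; decide)
  unfold getC at h
  induction g generalizing r with
  | nil => simp at hb
  | cons row tl ih =>
    cases r with
    | zero =>
      simp only [List.getD_cons_zero] at h hb
      simp only [setC, List.getD_cons_zero, List.set_cons_zero, dots, List.map_cons, List.sum_cons]
      have := countP_set_dot row c hb.2 h
      omega
    | succ r =>
      simp only [List.getD_cons_succ] at h hb
      simp only [setC, List.getD_cons_succ, List.set_cons_succ, dots, List.map_cons, List.sum_cons]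
      have := ih h ⟨by simpa using hb.1, hb.2⟩
      simp only [setC, dots] at this
      omega

lemma dots_setC_le (g : List (List String)) (r c : Nat) :
    dots (setC g r c "B") ≤ dots g := by
  induction g generalizing r with
  | nil => simp [setC, dots]
  | cons row tl ih =>
    cases r with
    | zero =>
      simp only [setC, List.getD_cons_zero, List.set_cons_zero, dots, List.map_cons, List.sum_cons]
      have := countP_set_le row c
      omega
    | succ r =>
      simp only [setC, List.getD_cons_succ, List.set_cons_succ, dots, List.map_cons, List.sum_cons]
      have := ih r
      simp only [setC, dots] at this
      omega

-- ===== PORT A =====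
-- the shared guard '0 <= nr < rows and 0 <= nc < cols and grid[nr][nc] == "."' (nr = r + dr, nc = c + dc)
abbrev aguard (rows cols : Nat) (g : List (List String)) (r c : Nat) (d : Int × Int) : Prop :=
  0 ≤ (r : Int) + d.1 ∧ (r : Int) + d.1 < (rows : Int) ∧
  0 ≤ (c : Int) + d.2 ∧ (c : Int) + d.2 < (cols : Int) ∧
  getC g ((r : Int) + d.1).toNat ((c : Int) + d.2).toNat = "."


-- body of A's inner 'for dr, dc in directions' loop; state = (grid, queue, empty, max_time)
def abody (rows cols r c t : Nat)
    (st : List (List String) × List (Nat × Nat × Nat) × Int × Nat) (d : Int × Int) :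
    List (List String) × List (Nat × Nat × Nat) × Int × Nat :=
  if aguard rows cols st.1 r c d then
    (setC st.1 ((r : Int) + d.1).toNat ((c : Int) + d.2).toNat "B",
     st.2.1 ++ [(((r : Int) + d.1).toNat, ((c : Int) + d.2).toNat, t + 1)],
     st.2.2.1 - 1, max st.2.2.2 (t + 1))
  else st

lemma abody_measure (rows cols r c t : Nat) :
    ∀ (ds : List (Int × Int)) (st : List (List String) × List (Nat × Nat × Nat) × Int × Nat),
    (ds.foldl (abody rows cols r c t) st).2.1.length + dots (ds.foldl (abody rows cols r c t) st).1
      = st.2.1.length + dots st.1 := by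
  intro ds
  induction ds with
  | nil => intro st; rfl
  | cons d ds ih =>
    intro st
    rw [List.foldl_cons, ih]
    unfold abody
    split_ifs with hg
    · obtain ⟨-, -, -, -, hdot⟩ := hg
      simp only [List.length_append, List.length_cons, List.length_nil]
      have := dots_setC hdot
      omega
    · rfl

-- fill_grid's loops (queue of 'B' starting points with time 0, count of '.' cells)
def fillA (g : List (List String)) (rows cols : Nat) : List (Nat × Nat × Nat) × Int :=
  (List.range rows).foldl (fun st r =>
    (List.range cols).foldl (fun st c =>
      if getC g r c = "B" then (st.1 ++ [(r, c, 0)], st.2)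
      else if getC g r c = "." then (st.1, st.2 + 1) else st) st) ([], 0)

-- A's 'while queue' loop
def aloop (rows cols : Nat) (g : List (List String)) (q : List (Nat × Nat × Nat))
    (e : Int) (m : Nat) : Int :=
  match q with
  | [] => if e = 0 then (m : Int) else -1
  | (r, c, t) :: rest =>
      aloop rows cols (pvDirs.foldl (abody rows cols r c t) (g, rest, e, m)).1
        (pvDirs.foldl (abody rows cols r c t) (g, rest, e, m)).2.1
        (pvDirs.foldl (abody rows cols r c t) (g, rest, e, m)).2.2.1
        (pvDirs.foldl (abody rows cols r c t) (g, rest, e, m)).2.2.2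
termination_by q.length + dots g
decreasing_by
  have h := abody_measure rows cols r c t pvDirs (g, rest, e, m)
  simp only [List.length_cons] at h ⊢
  omega

def min_hours_to_infect (grid : List (List String)) : Int :=
  let rows := grid.length
  let cols := (grid.headD []).length
  let f := fillA grid rows cols
  aloop rows cols grid f.1 f.2 0

-- ===== PORT B =====
-- one pass's scan: every '.' cell with an in-bounds orthogonal 'B' neighbour
def dotFresh (rows cols : Nat) (g : List (List String)) : List (Nat × Nat) :=
  (List.range rows).flatMap (fun r =>
    (List.range cols).filterMap (fun c =>
      if getC g r c = "." ∧ ∃ d ∈ pvDirs,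
          0 ≤ (r : Int) + d.1 ∧ (r : Int) + d.1 < (rows : Int) ∧
          0 ≤ (c : Int) + d.2 ∧ (c : Int) + d.2 < (cols : Int) ∧
          getC g ((r : Int) + d.1).toNat ((c : Int) + d.2).toNat = "B"
      then some (r, c) else none))

def countDots (rows cols : Nat) (g : List (List String)) : Int :=
  (((List.range rows).flatMap (fun r =>
      (List.range cols).filter (fun c => getC g r c == "."))).length : Int)

def markAll (g : List (List String)) (l : List (Nat × Nat)) : List (List String) :=
  l.foldl (fun g p => setC g p.1 p.2 "B") g

lemma mem_dotFresh_dot {rows cols : Nat} {g : List (List String)} {p : Nat × Nat}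
    (h : p ∈ dotFresh rows cols g) : getC g p.1 p.2 = "." := by
  simp only [dotFresh, List.mem_flatMap, List.mem_filterMap, List.mem_range] at h
  obtain ⟨r, hr, c, hc, hsome⟩ := h
  split_ifs at hsome with hg
  obtain rfl := Option.some.inj hsome
  exact hg.1

lemma dots_markAll_le : ∀ (l : List (Nat × Nat)) (g : List (List String)),
    dots (markAll g l) ≤ dots g := by
  intro l
  induction l with
  | nil => intro g; simp [markAll]
  | cons p l ih =>
    intro g
    have h1 : markAll g (p :: l) = markAll (setC g p.1 p.2 "B") l := rfl
    rw [h1]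
    exact (ih _).trans (dots_setC_le g p.1 p.2)

lemma dots_markAll_lt {g : List (List String)} {p : Nat × Nat} (l : List (Nat × Nat))
    (hdot : getC g p.1 p.2 = ".") : dots (markAll g (p :: l)) < dots g := by
  have h1 : markAll g (p :: l) = markAll (setC g p.1 p.2 "B") l := rfl
  rw [h1]
  have h2 := dots_markAll_le l (setC g p.1 p.2 "B")
  have h3 := dots_setC hdot
  omega

-- B's 'while True' pass loop
def bloop (rows cols : Nat) (g : List (List String)) (e : Int) (hours : Nat) : Int :=
  let fresh := dotFresh rows cols g
  if h : fresh = [] then (if e = 0 then (hours : Int) else -1)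
  else bloop rows cols (markAll g fresh) (e - fresh.length) (hours + 1)
termination_by dots g
decreasing_by
  obtain ⟨p, l, hpl⟩ := List.exists_cons_of_ne_nil h
  rw [show dotFresh rows cols g = p :: l from hpl]
  exact dots_markAll_lt l (mem_dotFresh_dot (hpl ▸ List.mem_cons_self ..))

def min_hours_to_infect_alt (grid : List (List String)) : Int :=
  let rows := grid.length
  let cols := (grid.headD []).length
  bloop rows cols grid (countDots rows cols grid) 0

-- ===== PRECONDITION & SPEC =====
-- Pre_ excludes exactly the inputs on which Python A raises IndexError: the empty grid
-- (grid[0]) and ragged grids with a row shorter than row 0 (grid[r][c], c < len(grid[0])).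
def Pre_min_hours_to_infect (grid : List (List String)) : Prop :=
  grid ≠ [] ∧ ∀ row ∈ grid, (grid.headD []).length ≤ row.length
instance (grid : List (List String)) : Decidable (Pre_min_hours_to_infect grid) := by
  unfold Pre_min_hours_to_infect; infer_instance
def pvWitness_min_hours_to_infect : List (List String) := [["B", "."]]

def Spec_min_hours_to_infect (grid : List (List String)) (out : Int) : Prop := out = min_hours_to_infect_alt grid
instance (grid : List (List String)) (out : Int) : Decidable (Spec_min_hours_to_infect grid out) := by unfold Spec_min_hours_to_infect; infer_instance

-- ===== CLAIM (what is proved, stated in full; the proofs are below) =====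
def Claim_equal_min_hours_to_infect : Prop := ∀ (grid : List (List String)), Dom_min_hours_to_infect grid → Pre_min_hours_to_infect grid → Spec_min_hours_to_infect grid (min_hours_to_infect grid)

-- ===== LEMMAS AND PROOFS =====

-- window membership and 4-adjacency
def inWin (rows cols : Nat) (p : Nat × Nat) : Prop := p.1 < rows ∧ p.2 < cols
def adjP (u p : Nat × Nat) : Prop :=
  ∃ d ∈ pvDirs, (p.1 : Int) = (u.1 : Int) + d.1 ∧ (p.2 : Int) = (u.2 : Int) + d.2

lemma adjP_symm {u p : Nat × Nat} (h : adjP u p) : adjP p u := by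
  obtain ⟨d, hd, h1, h2⟩ := h
  simp only [pvDirs, List.mem_cons, List.not_mem_nil, or_false] at hd
  rcases hd with rfl | rfl | rfl | rfl
  · exact ⟨(1, 0), by simp [pvDirs], by norm_num at h1 h2 ⊢; omega, by norm_num at h1 h2 ⊢; omega⟩
  · exact ⟨(-1, 0), by simp [pvDirs], by norm_num at h1 h2 ⊢; omega, by norm_num at h1 h2 ⊢; omega⟩
  · exact ⟨(0, 1), by simp [pvDirs], by norm_num at h1 h2 ⊢; omega, by norm_num at h1 h2 ⊢; omega⟩
  · exact ⟨(0, -1), by simp [pvDirs], by norm_num at h1 h2 ⊢; omega, by norm_num at h1 h2 ⊢; omega⟩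

lemma abody_true {rows cols r c t : Nat} {g : List (List String)}
    {q : List (Nat × Nat × Nat)} {e : Int} {m : Nat} {d : Int × Int}
    (h : aguard rows cols g r c d) :
    abody rows cols r c t (g, q, e, m) d
      = (setC g ((r : Int) + d.1).toNat ((c : Int) + d.2).toNat "B",
         q ++ [(((r : Int) + d.1).toNat, ((c : Int) + d.2).toNat, t + 1)],
         e - 1, max m (t + 1)) := by simp [abody, h]

lemma abody_false {rows cols r c t : Nat} {g : List (List String)}
    {q : List (Nat × Nat × Nat)} {e : Int} {m : Nat} {d : Int × Int}
    (h : ¬ aguard rows cols g r c d) :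
    abody rows cols r c t (g, q, e, m) d = (g, q, e, m) := by simp [abody, h]

def stamp (t : Nat) (l : List (Nat × Nat)) : List (Nat × Nat × Nat) :=
  l.map (fun p => (p.1, p.2, t))

lemma stamp_append (t : Nat) (l1 l2 : List (Nat × Nat)) :
    stamp t (l1 ++ l2) = stamp t l1 ++ stamp t l2 := List.map_append ..

-- abstract single-cell processing (A's inner loop without queue/empty/max_time bookkeeping)
def pbody (rows cols : Nat) (u : Nat × Nat)
    (st : List (List String) × List (Nat × Nat)) (d : Int × Int) :
    List (List String) × List (Nat × Nat) :=
  if aguard rows cols st.1 u.1 u.2 d then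
    (setC st.1 ((u.1 : Int) + d.1).toNat ((u.2 : Int) + d.2).toNat "B",
     st.2 ++ [(((u.1 : Int) + d.1).toNat, ((u.2 : Int) + d.2).toNat)])
  else st

lemma pbody_true {rows cols : Nat} {u : Nat × Nat} {g : List (List String)}
    {acc : List (Nat × Nat)} {d : Int × Int} (h : aguard rows cols g u.1 u.2 d) :
    pbody rows cols u (g, acc) d
      = (setC g ((u.1 : Int) + d.1).toNat ((u.2 : Int) + d.2).toNat "B",
         acc ++ [(((u.1 : Int) + d.1).toNat, ((u.2 : Int) + d.2).toNat)]) := by simp [pbody, h]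

lemma pbody_false {rows cols : Nat} {u : Nat × Nat} {g : List (List String)}
    {acc : List (Nat × Nat)} {d : Int × Int} (h : ¬ aguard rows cols g u.1 u.2 d) :
    pbody rows cols u (g, acc) d = (g, acc) := by simp [pbody, h]

def pOne (rows cols : Nat) (g : List (List String)) (u : Nat × Nat) :
    List (List String) × List (Nat × Nat) :=
  pvDirs.foldl (pbody rows cols u) (g, [])

def pAll (rows cols : Nat) : List (List String) → List (Nat × Nat) →
    List (List String) × List (Nat × Nat)
  | g, [] => (g, [])
  | g, u :: q =>
      let a := pOne rows cols g u
      let b := pAll rows cols a.1 q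
      (b.1, a.2 ++ b.2)

lemma pfold_acc (rows cols : Nat) (u : Nat × Nat) :
    ∀ (ds : List (Int × Int)) (g : List (List String)) (acc : List (Nat × Nat)),
    ds.foldl (pbody rows cols u) (g, acc)
      = ((ds.foldl (pbody rows cols u) (g, [])).1,
         acc ++ (ds.foldl (pbody rows cols u) (g, [])).2) := by
  intro ds
  induction ds with
  | nil => intro g acc; simp
  | cons d ds ih =>
    intro g acc
    rcases Decidable.em (aguard rows cols g u.1 u.2 d) with hg | hg
    · rw [List.foldl_cons, List.foldl_cons, pbody_true hg, pbody_true hg,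
        ih _ (acc ++ [_]), ih _ ([] ++ [_])]
      simp [List.append_assoc]
    · rw [List.foldl_cons, List.foldl_cons, pbody_false hg, pbody_false hg]
      exact ih g acc

lemma abody_pfold (rows cols t r c : Nat) :
    ∀ (ds : List (Int × Int)) (g : List (List String)) (q : List (Nat × Nat × Nat))
      (e : Int) (m : Nat),
    ds.foldl (abody rows cols r c t) (g, q, e, m)
      = ((ds.foldl (pbody rows cols (r, c)) (g, [])).1,
         q ++ stamp (t + 1) (ds.foldl (pbody rows cols (r, c)) (g, [])).2,
         e - ((ds.foldl (pbody rows cols (r, c)) (g, [])).2.length : Int),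
         if (ds.foldl (pbody rows cols (r, c)) (g, [])).2 = [] then m else max m (t + 1)) := by
  intro ds
  induction ds with
  | nil => intro g q e m; simp [stamp]
  | cons d ds ih =>
    intro g q e m
    rcases Decidable.em (aguard rows cols g r c d) with hg | hg
    · rw [List.foldl_cons, List.foldl_cons, abody_true hg,
        pbody_true (u := (r, c)) hg, ih,
        pfold_acc rows cols (r, c) ds _ ([] ++ [_])]
      simp only [List.nil_append]
      refine Prod.ext (by rfl) (Prod.ext ?_ (Prod.ext ?_ ?_)) <;> dsimp only
      · simp [stamp, List.append_assoc]
      · push_cast [List.length_append, List.length_cons, List.length_nil]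
        omega
      · split_ifs with h1 h2 h3 <;> simp_all
    · rw [List.foldl_cons, List.foldl_cons, abody_false hg, pbody_false (u := (r, c)) hg]
      exact ih g q e m

lemma aloop_nil (rows cols : Nat) (g : List (List String)) (e : Int) (m : Nat) :
    aloop rows cols g [] e m = if e = 0 then (m : Int) else -1 := by
  rw [aloop]

lemma aloop_cons (rows cols : Nat) (g : List (List String)) (r c t : Nat)
    (rest : List (Nat × Nat × Nat)) (e : Int) (m : Nat) :
    aloop rows cols g ((r, c, t) :: rest) e m
      = aloop rows cols (pvDirs.foldl (abody rows cols r c t) (g, rest, e, m)).1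
          (pvDirs.foldl (abody rows cols r c t) (g, rest, e, m)).2.1
          (pvDirs.foldl (abody rows cols r c t) (g, rest, e, m)).2.2.1
          (pvDirs.foldl (abody rows cols r c t) (g, rest, e, m)).2.2.2 := by
  rw [aloop]

lemma pOne_eq (rows cols : Nat) (g : List (List String)) (u : Nat × Nat) :
    List.foldl (pbody rows cols u) (g, []) pvDirs = pOne rows cols g u := rfl

lemma pAll_cons (rows cols : Nat) (g : List (List String)) (u : Nat × Nat)
    (q : List (Nat × Nat)) :
    pAll rows cols g (u :: q)
      = ((pAll rows cols (pOne rows cols g u).1 q).1,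
         (pOne rows cols g u).2 ++ (pAll rows cols (pOne rows cols g u).1 q).2) := rfl

lemma if_max_combine (n1 n2 : List (Nat × Nat)) (m t : Nat) :
    (if n2 = [] then (if n1 = [] then m else max m (t + 1))
     else max (if n1 = [] then m else max m (t + 1)) (t + 1))
      = if n1 ++ n2 = [] then m else max m (t + 1) := by
  rcases n1 <;> rcases n2 <;> simp

lemma pass (rows cols : Nat) :
    ∀ (q : List (Nat × Nat)) (g : List (List String)) (acc : List (Nat × Nat))
      (e : Int) (m t : Nat),
    aloop rows cols g (stamp t q ++ stamp (t + 1) acc) e m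
      = aloop rows cols (pAll rows cols g q).1
          (stamp (t + 1) (acc ++ (pAll rows cols g q).2))
          (e - ((pAll rows cols g q).2.length : Int))
          (if (pAll rows cols g q).2 = [] then m else max m (t + 1)) := by
  intro q
  induction q with
  | nil =>
    intro g acc e m t
    simp [pAll, stamp]
  | cons u q ih =>
    intro g acc e m t
    obtain ⟨r, c⟩ := u
    rw [show stamp t ((r, c) :: q) ++ stamp (t + 1) acc
        = (r, c, t) :: (stamp t q ++ stamp (t + 1) acc) from rfl, aloop_cons]
    rw [abody_pfold rows cols t r c pvDirs g (stamp t q ++ stamp (t + 1) acc) e m]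
    dsimp only
    rw [pOne_eq, List.append_assoc, ← stamp_append, ih, pAll_cons]
    dsimp only
    generalize (pOne rows cols g (r, c)).2 = n1
    generalize (pAll rows cols (pOne rows cols g (r, c)).1 q).2 = n2
    rw [List.append_assoc, if_max_combine]
    have he : e - (n1.length : Int) - (n2.length : Int) = e - ((n1 ++ n2).length : Int) := by
      push_cast [List.length_append]
      ring
    rw [he]

-- grid shape and pointwise-marking descriptions
def shapeEq (g g' : List (List String)) : Prop :=
  g'.length = g.length ∧ ∀ r, (g'.getD r []).length = (g.getD r []).length

def marked (g : List (List String)) (S : List (Nat × Nat)) (g' : List (List String)) : Prop :=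
  ∀ r c, getC g' r c = if (r, c) ∈ S then "B" else getC g r c

lemma shapeEq_refl (g : List (List String)) : shapeEq g g := ⟨rfl, fun _ => rfl⟩

lemma shapeEq_trans {g1 g2 g3 : List (List String)} (h1 : shapeEq g1 g2) (h2 : shapeEq g2 g3) :
    shapeEq g1 g3 := ⟨h2.1.trans h1.1, fun r => (h2.2 r).trans (h1.2 r)⟩

lemma getC_eq (g : List (List String)) (r c : Nat) :
    getC g r c = ((g[r]?).getD [])[c]?.getD "" := by
  simp only [getC, List.getD_eq_getElem?_getD]

lemma shape_setC (g : List (List String)) (r c : Nat) (v : String) :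
    shapeEq g (setC g r c v) := by
  refine ⟨by simp [setC], fun r' => ?_⟩
  simp only [setC, List.getD_eq_getElem?_getD, List.getElem?_set]
  by_cases hr : r = r'
  · subst hr
    by_cases hlt : r < g.length
    · simp [hlt]
    · simp [hlt]
  · simp [hr]

lemma getC_setC_self {g : List (List String)} {r c : Nat} (v : String)
    (h1 : r < g.length) (h2 : c < (g.getD r []).length) : getC (setC g r c v) r c = v := by
  simp only [getC_eq, setC, List.getElem?_set, if_pos h1]
  rw [List.getD_eq_getElem _ _ h1] at h2 ⊢
  simp [h2]

lemma getC_setC_ne {g : List (List String)} {r c r' c' : Nat} (v : String)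
    (h : (r', c') ≠ (r, c)) : getC (setC g r c v) r' c' = getC g r' c' := by
  simp only [getC_eq, setC, List.getElem?_set]
  by_cases hr : r = r'
  · subst hr
    have hc : c ≠ c' := fun hcc => h (by simp [hcc])
    by_cases hlt : r < g.length
    · simp [hlt, hc, List.getD_eq_getElem?_getD]
    · simp [hlt]
  · simp [hr]

lemma grid_ext {g g1 g2 : List (List String)} (h1 : shapeEq g g1) (h2 : shapeEq g g2)
    (h : ∀ r c, getC g1 r c = getC g2 r c) : g1 = g2 := by
  have hlen : g1.length = g2.length := h1.1.trans h2.1.symm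
  apply List.ext_getElem hlen
  intro r hr1 hr2
  have hrl : g1[r].length = g2[r].length := by
    have e1 := h1.2 r
    have e2 := h2.2 r
    rw [List.getD_eq_getElem _ _ hr1] at e1
    rw [List.getD_eq_getElem _ _ hr2] at e2
    omega
  apply List.ext_getElem hrl
  intro c hc1 hc2
  have := h r c
  simp only [getC_eq, List.getElem?_eq_getElem hr1, List.getElem?_eq_getElem hr2,
    Option.getD_some, List.getElem?_eq_getElem hc1, List.getElem?_eq_getElem hc2] at this
  exact this

lemma pfold_spec (rows cols : Nat) (u : Nat × Nat) :
    ∀ (ds : List (Int × Int)) (g : List (List String)),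
    shapeEq g (ds.foldl (pbody rows cols u) (g, [])).1 ∧
    marked g (ds.foldl (pbody rows cols u) (g, [])).2 (ds.foldl (pbody rows cols u) (g, [])).1 ∧
    (ds.foldl (pbody rows cols u) (g, [])).2.Nodup ∧
    (∀ p ∈ (ds.foldl (pbody rows cols u) (g, [])).2,
       getC g p.1 p.2 = "." ∧ inWin rows cols p ∧
       ∃ d ∈ ds, (p.1 : Int) = (u.1 : Int) + d.1 ∧ (p.2 : Int) = (u.2 : Int) + d.2) ∧
    (∀ p : Nat × Nat, getC g p.1 p.2 = "." → inWin rows cols p →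
       (∃ d ∈ ds, (p.1 : Int) = (u.1 : Int) + d.1 ∧ (p.2 : Int) = (u.2 : Int) + d.2) →
       p ∈ (ds.foldl (pbody rows cols u) (g, [])).2) := by
  intro ds
  induction ds with
  | nil =>
    intro g
    refine ⟨shapeEq_refl g, fun r c => by simp, by simp, by simp, by simp⟩
  | cons d ds ih =>
    intro g
    rcases Decidable.em (aguard rows cols g u.1 u.2 d) with hg | hg
    · obtain ⟨hnr0, hnrlt, hnc0, hnclt, hdot⟩ := hg
      have hfold : List.foldl (pbody rows cols u) (g, []) (d :: ds)
          = ((List.foldl (pbody rows cols u) (setC g ((u.1:Int)+d.1).toNat ((u.2:Int)+d.2).toNat "B", []) ds).1,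
             (((u.1:Int)+d.1).toNat, ((u.2:Int)+d.2).toNat)
               :: (List.foldl (pbody rows cols u) (setC g ((u.1:Int)+d.1).toNat ((u.2:Int)+d.2).toNat "B", []) ds).2) := by
        rw [List.foldl_cons, pbody_true ⟨hnr0, hnrlt, hnc0, hnclt, hdot⟩,
          pfold_acc rows cols u ds _ ([] ++ [_])]
        simp
      rw [hfold]
      obtain ⟨ihs, ihm, ihn, ihsound, ihcomp⟩ :=
        ih (setC g ((u.1:Int)+d.1).toNat ((u.2:Int)+d.2).toNat "B")
      have hgx : getC g ((u.1:Int)+d.1).toNat ((u.2:Int)+d.2).toNat = "." := hdot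
      have hbx := getC_bounds (g := g) (by rw [hgx]; decide)
      have hB : getC (setC g ((u.1:Int)+d.1).toNat ((u.2:Int)+d.2).toNat "B")
          ((u.1:Int)+d.1).toNat ((u.2:Int)+d.2).toNat = "B" :=
        getC_setC_self "B" hbx.1 hbx.2
      refine ⟨shapeEq_trans (shape_setC g _ _ "B") ihs, ?_, ?_, ?_, ?_⟩
      · -- marked
        intro r c
        rw [ihm r c]
        by_cases hmem : (r, c) ∈ (List.foldl (pbody rows cols u)
            (setC g ((u.1:Int)+d.1).toNat ((u.2:Int)+d.2).toNat "B", []) ds).2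
        · simp [hmem]
        · rw [if_neg hmem]
          by_cases hx2 : (r, c) = (((u.1:Int)+d.1).toNat, ((u.2:Int)+d.2).toNat)
          · obtain ⟨h1, h2⟩ := Prod.mk.injEq .. ▸ hx2
            subst h1; subst h2
            rw [if_pos (List.mem_cons_self ..)]
            exact hB
          · rw [getC_setC_ne "B" hx2, if_neg (by
              intro hmem2
              rcases List.mem_cons.mp hmem2 with h | h
              · exact hx2 h
              · exact hmem h)]
      · -- nodup
        refine List.nodup_cons.mpr ⟨?_, ihn⟩
        intro hmem
        have := (ihsound _ hmem).1
        rw [hB] at this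
        exact absurd this (by decide)
      · -- sound
        intro p hp
        rcases List.mem_cons.mp hp with rfl | hp2
        · refine ⟨hgx, ⟨by omega, by omega⟩, d, List.mem_cons_self .., by omega, by omega⟩
        · obtain ⟨hdotg1, hwin, d', hd', heq⟩ := ihsound p hp2
          have hne : p ≠ (((u.1:Int)+d.1).toNat, ((u.2:Int)+d.2).toNat) := by
            intro h
            rw [h] at hdotg1
            rw [hB] at hdotg1
            exact absurd hdotg1 (by decide)
          refine ⟨?_, hwin, d', List.mem_cons_of_mem _ hd', heq⟩
          rw [← Prod.mk.eta (p := p)] at hne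
          rw [getC_setC_ne "B" hne] at hdotg1
          exact hdotg1
      · -- complete
        intro p hdotp hwin ⟨d', hd', h1, h2⟩
        by_cases hpx : p = (((u.1:Int)+d.1).toNat, ((u.2:Int)+d.2).toNat)
        · exact hpx ▸ List.mem_cons_self ..
        · rcases List.mem_cons.mp hd' with rfl | hd2
          · exact absurd (Prod.ext (by omega) (by omega)) hpx
          · refine List.mem_cons_of_mem _ (ihcomp p ?_ hwin ⟨d', hd2, h1, h2⟩)
            rw [← Prod.mk.eta (p := p)] at hpx
            rw [getC_setC_ne "B" hpx]
            exact hdotp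
    · have hfold : List.foldl (pbody rows cols u) (g, []) (d :: ds)
          = List.foldl (pbody rows cols u) (g, []) ds := by
        rw [List.foldl_cons, pbody_false hg]
      rw [hfold]
      obtain ⟨ihs, ihm, ihn, ihsound, ihcomp⟩ := ih g
      refine ⟨ihs, ihm, ihn, ?_, ?_⟩
      · intro p hp
        obtain ⟨h1, h2, d', hd', heq⟩ := ihsound p hp
        exact ⟨h1, h2, d', List.mem_cons_of_mem _ hd', heq⟩
      · intro p hdotp hwin ⟨d', hd', h1, h2⟩
        obtain ⟨hw1, hw2⟩ := hwin
        rcases List.mem_cons.mp hd' with rfl | hd2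
        · exact absurd ⟨by omega, by omega, by omega, by omega, by
            have e1 : ((u.1:Int) + d'.1).toNat = p.1 := by omega
            have e2 : ((u.2:Int) + d'.2).toNat = p.2 := by omega
            rw [e1, e2]
            exact hdotp⟩ hg
        · exact ihcomp p hdotp ⟨hw1, hw2⟩ ⟨d', hd2, h1, h2⟩

lemma pAll_spec (rows cols : Nat) :
    ∀ (q : List (Nat × Nat)) (g : List (List String)),
    shapeEq g (pAll rows cols g q).1 ∧
    marked g (pAll rows cols g q).2 (pAll rows cols g q).1 ∧
    (pAll rows cols g q).2.Nodup ∧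
    (∀ p ∈ (pAll rows cols g q).2,
       getC g p.1 p.2 = "." ∧ inWin rows cols p ∧ ∃ u ∈ q, adjP u p) ∧
    (∀ p : Nat × Nat, getC g p.1 p.2 = "." → inWin rows cols p →
       (∃ u ∈ q, adjP u p) → p ∈ (pAll rows cols g q).2) := by
  intro q
  induction q with
  | nil =>
    intro g
    exact ⟨shapeEq_refl g, fun r c => by simp [pAll], by simp [pAll], by simp [pAll],
      by simp [pAll]⟩
  | cons u q ih =>
    intro g
    rw [pAll_cons]
    obtain ⟨s1, m1, n1, so1, co1⟩ := pfold_spec rows cols u pvDirs g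
    rw [pOne_eq] at s1 m1 n1 so1 co1
    obtain ⟨s2, m2, n2, so2, co2⟩ := ih (pOne rows cols g u).1
    dsimp only
    refine ⟨shapeEq_trans s1 s2, ?_, ?_, ?_, ?_⟩
    · intro r c
      rw [m2 r c]
      by_cases h2 : (r, c) ∈ (pAll rows cols (pOne rows cols g u).1 q).2
      · simp [h2]
      · rw [if_neg h2, m1 r c]
        by_cases h1 : (r, c) ∈ (pOne rows cols g u).2
        · simp [h1]
        · rw [if_neg h1, if_neg (by simp [List.mem_append, h1, h2])]
    · refine List.Nodup.append n1 n2 ?_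
      intro p hp1 hp2
      have hdot1 := (so2 p hp2).1
      rw [m1 p.1 p.2, Prod.mk.eta, if_pos hp1] at hdot1
      exact absurd hdot1 (by decide)
    · intro p hp
      rcases List.mem_append.mp hp with h1 | h2
      · obtain ⟨hd, hw, hadj⟩ := so1 p h1
        exact ⟨hd, hw, u, List.mem_cons_self .., hadj⟩
      · obtain ⟨hd, hw, v, hv, hadj⟩ := so2 p h2
        have hd0 : getC g p.1 p.2 = "." := by
          rw [m1 p.1 p.2, Prod.mk.eta] at hd
          by_cases h1 : p ∈ (pOne rows cols g u).2
          · rw [if_pos h1] at hd; exact absurd hd (by decide)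
          · rwa [if_neg h1] at hd
        exact ⟨hd0, hw, v, List.mem_cons_of_mem _ hv, hadj⟩
    · intro p hdot hwin ⟨v, hv, hadj⟩
      rcases List.mem_cons.mp hv with rfl | hv2
      · exact List.mem_append.mpr (Or.inl (co1 p hdot hwin hadj))
      · by_cases h1 : p ∈ (pOne rows cols g u).2
        · exact List.mem_append.mpr (Or.inl h1)
        · refine List.mem_append.mpr (Or.inr (co2 p ?_ hwin ⟨v, hv2, hadj⟩))
          rw [m1 p.1 p.2, Prod.mk.eta, if_neg h1]
          exact hdot

lemma mem_dotFresh {rows cols : Nat} {g : List (List String)} {p : Nat × Nat} :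
    p ∈ dotFresh rows cols g ↔
      (inWin rows cols p ∧ getC g p.1 p.2 = "." ∧
       ∃ b, inWin rows cols b ∧ adjP p b ∧ getC g b.1 b.2 = "B") := by
  constructor
  · intro h
    simp only [dotFresh, List.mem_flatMap, List.mem_filterMap, List.mem_range] at h
    obtain ⟨r, hr, c, hc, hsome⟩ := h
    split_ifs at hsome with hg
    obtain rfl := Option.some.inj hsome
    obtain ⟨hdot, d, hd, h0, h1, h2, h3, hB⟩ := hg
    exact ⟨⟨hr, hc⟩, hdot, (((r : Int) + d.1).toNat, ((c : Int) + d.2).toNat),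
      ⟨by omega, by omega⟩, ⟨d, hd, by omega, by omega⟩, hB⟩
  · rintro ⟨⟨hr, hc⟩, hdot, b, ⟨hbr, hbc⟩, ⟨d, hd, e1, e2⟩, hB⟩
    simp only [dotFresh, List.mem_flatMap, List.mem_filterMap, List.mem_range]
    refine ⟨p.1, hr, p.2, hc, ?_⟩
    have e1' : ((p.1 : Int) + d.1).toNat = b.1 := by omega
    have e2' : ((p.2 : Int) + d.2).toNat = b.2 := by omega
    rw [if_pos ⟨hdot, d, hd, by omega, by omega, by omega, by omega,
      by rw [e1', e2']; exact hB⟩]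

lemma nodup_grid_scan {rows cols : Nat} (P : Nat → Nat → Prop) [inst : ∀ r c, Decidable (P r c)] :
    ((List.range rows).flatMap (fun r =>
      (List.range cols).filterMap (fun c => if P r c then some (r, c) else none))).Nodup := by
  rw [List.nodup_flatMap]
  refine ⟨fun r _ => List.Nodup.filterMap ?_ List.nodup_range, ?_⟩
  · intro a a' b hb hb'
    split_ifs at hb hb' <;>
      simp only [Option.mem_def, Option.some.injEq, reduceCtorEq] at hb hb'
    exact ((Prod.mk.injEq _ _ _ _).mp (hb.trans hb'.symm)).2
  · refine List.Pairwise.imp ?_ List.pairwise_lt_range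
    intro r r' hlt x hx hx'
    obtain ⟨c, _, h1⟩ := List.mem_filterMap.mp hx
    obtain ⟨c', _, h2⟩ := List.mem_filterMap.mp hx'
    split_ifs at h1 h2
    obtain rfl := Option.some.inj h1
    have heq := Option.some.inj h2
    simp only [Prod.mk.injEq] at heq
    omega

lemma nodup_dotFresh (rows cols : Nat) (g : List (List String)) :
    (dotFresh rows cols g).Nodup :=
  nodup_grid_scan _

lemma markAll_shape : ∀ (l : List (Nat × Nat)) (g : List (List String)),
    shapeEq g (markAll g l) := by
  intro l
  induction l with
  | nil => intro g; exact shapeEq_refl g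
  | cons p l ih =>
    intro g
    exact shapeEq_trans (shape_setC g p.1 p.2 "B") (ih (setC g p.1 p.2 "B"))

lemma markAll_marked : ∀ (l : List (Nat × Nat)) (g : List (List String)), l.Nodup →
    (∀ p ∈ l, getC g p.1 p.2 = ".") → marked g l (markAll g l) := by
  intro l
  induction l with
  | nil => intro g _ _ r c; simp [markAll]
  | cons p l ih =>
    intro g hnd hdots
    have hd : getC g p.1 p.2 = "." := hdots p (List.mem_cons_self ..)
    have hb := getC_bounds (g := g) (by rw [hd]; decide)
    obtain ⟨hnp, hnl⟩ := List.nodup_cons.mp hnd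
    have hdots1 : ∀ x ∈ l, getC (setC g p.1 p.2 "B") x.1 x.2 = "." := by
      intro x hx
      have hne : (x.1, x.2) ≠ (p.1, p.2) := by
        intro hc
        rw [Prod.mk.eta, Prod.mk.eta] at hc
        exact hnp (hc ▸ hx)
      rw [getC_setC_ne "B" hne]
      exact hdots x (List.mem_cons_of_mem _ hx)
    have hm := ih (setC g p.1 p.2 "B") hnl hdots1
    intro r c
    rw [show markAll g (p :: l) = markAll (setC g p.1 p.2 "B") l from rfl, hm r c]
    by_cases h2 : (r, c) ∈ l
    · simp [h2]
    · rw [if_neg h2]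
      by_cases h3 : (r, c) = p
      · rw [if_pos (by rw [h3]; exact List.mem_cons_self ..)]
        obtain ⟨rfl, rfl⟩ : r = p.1 ∧ c = p.2 := by rw [← h3]; exact ⟨rfl, rfl⟩
        exact getC_setC_self "B" hb.1 hb.2
      · have hne : (r, c) ≠ (p.1, p.2) := by rw [Prod.mk.eta]; exact h3
        have hnotmem : (r, c) ∉ p :: l := by
          intro hc
          rcases List.mem_cons.mp hc with h | h
          · exact h3 h
          · exact h2 h
        rw [getC_setC_ne "B" hne, if_neg hnotmem]

-- the frontier invariant: queue cells are in-window 'B' cells, and every '.' cell seeing a 'B'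
-- neighbour also sees a queue cell
def InvQ (rows cols : Nat) (g : List (List String)) (q : List (Nat × Nat)) : Prop :=
  (∀ u ∈ q, getC g u.1 u.2 = "B" ∧ inWin rows cols u) ∧
  (∀ p : Nat × Nat, getC g p.1 p.2 = "." → inWin rows cols p →
     (∃ b, inWin rows cols b ∧ adjP p b ∧ getC g b.1 b.2 = "B") → ∃ u ∈ q, adjP u p)

lemma InvQ_next {rows cols : Nat} {g g' : List (List String)} {F q : List (Nat × Nat)}
    (hInv : InvQ rows cols g q)
    (hchar : ∀ p : Nat × Nat, getC g' p.1 p.2 = if p ∈ F then "B" else getC g p.1 p.2)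
    (hF : ∀ p : Nat × Nat, p ∈ F ↔
      (inWin rows cols p ∧ getC g p.1 p.2 = "." ∧
       ∃ b, inWin rows cols b ∧ adjP p b ∧ getC g b.1 b.2 = "B")) :
    InvQ rows cols g' F := by
  obtain ⟨hq, hfront⟩ := hInv
  constructor
  · intro u hu
    have h1 := hchar u
    rw [if_pos hu] at h1
    exact ⟨h1, ((hF u).mp hu).1⟩
  · intro p hdot hwin ⟨b, hbw, hadj, hB⟩
    have hp1 := hchar p
    by_cases hpF : p ∈ F
    · rw [if_pos hpF] at hp1
      rw [hp1] at hdot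
      exact absurd hdot (by decide)
    · rw [if_neg hpF] at hp1
      have hdotg : getC g p.1 p.2 = "." := by rw [← hp1]; exact hdot
      by_cases hbF : b ∈ F
      · exact ⟨b, hbF, adjP_symm hadj⟩
      · have hb1 := hchar b
        rw [if_neg hbF] at hb1
        have hBg : getC g b.1 b.2 = "B" := by rw [← hb1]; exact hB
        exact absurd ((hF p).mpr ⟨hwin, hdotg, b, hbw, hadj, hBg⟩) hpF

lemma bloop_nil {rows cols : Nat} {g : List (List String)} (e : Int) (hours : Nat)
    (h : dotFresh rows cols g = []) :
    bloop rows cols g e hours = if e = 0 then (hours : Int) else -1 := by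
  rw [bloop]
  simp [h]

lemma bloop_step {rows cols : Nat} {g : List (List String)} (e : Int) (hours : Nat)
    (h : dotFresh rows cols g ≠ []) :
    bloop rows cols g e hours
      = bloop rows cols (markAll g (dotFresh rows cols g))
          (e - ((dotFresh rows cols g).length : Int)) (hours + 1) := by
  rw [bloop]
  simp [h]

lemma main_ind (rows cols : Nat) :
    ∀ (N : Nat) (g : List (List String)) (q : List (Nat × Nat)) (e : Int) (t : Nat),
    dots g < N → InvQ rows cols g q →
    aloop rows cols g (stamp t q) e t = bloop rows cols g e t := by
  intro N
  induction N with
  | zero => intro g q e t h; omega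
  | succ N ih =>
    intro g q e t hN hInv
    obtain ⟨sA, mA, nA, soA, coA⟩ := pAll_spec rows cols q g
    have hmem : ∀ p, p ∈ (pAll rows cols g q).2 ↔ p ∈ dotFresh rows cols g := by
      intro p
      rw [mem_dotFresh]
      constructor
      · intro hp
        obtain ⟨hd, hw, u, hu, hadj⟩ := soA p hp
        exact ⟨hw, hd, u, (hInv.1 u hu).2, adjP_symm hadj, (hInv.1 u hu).1⟩
      · rintro ⟨hw, hd, b, hbw, hadj, hB⟩
        exact coA p hd hw (hInv.2 p hd hw ⟨b, hbw, hadj, hB⟩)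
    have hpass := pass rows cols q g [] e t t
    rw [show stamp t q ++ stamp (t + 1) [] = stamp t q by simp [stamp]] at hpass
    by_cases hF : dotFresh rows cols g = []
    · have hP2 : (pAll rows cols g q).2 = [] := by
        rw [List.eq_nil_iff_forall_not_mem]
        intro p hp
        exact (List.eq_nil_iff_forall_not_mem.mp hF p) ((hmem p).mp hp)
      rw [hpass, hP2, show stamp (t + 1) ([] ++ ([] : List (Nat × Nat))) = [] from rfl,
        aloop_nil, bloop_nil e t hF]
      norm_num
    · have hP2ne : (pAll rows cols g q).2 ≠ [] := by
        obtain ⟨p, hp⟩ := List.exists_mem_of_ne_nil _ hF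
        intro h0
        exact (List.eq_nil_iff_forall_not_mem.mp h0 p) ((hmem p).mpr hp)
      have hlen : ((pAll rows cols g q).2.length : Int) = ((dotFresh rows cols g).length : Int) := by
        exact_mod_cast congrArg Nat.cast (List.Perm.length_eq
          ((List.perm_ext_iff_of_nodup nA (nodup_dotFresh rows cols g)).2 hmem))
      have hgrid : (pAll rows cols g q).1 = markAll g (dotFresh rows cols g) := by
        apply grid_ext sA (markAll_shape _ g)
        intro r c
        rw [mA r c, (markAll_marked _ g (nodup_dotFresh rows cols g)
          (fun p hp => mem_dotFresh_dot hp)) r c]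
        by_cases h1 : (r, c) ∈ (pAll rows cols g q).2
        · rw [if_pos h1, if_pos ((hmem _).mp h1)]
        · rw [if_neg h1, if_neg (fun hc => h1 ((hmem _).mpr hc))]
      have hInv2 : InvQ rows cols (markAll g (dotFresh rows cols g)) (pAll rows cols g q).2 := by
        refine InvQ_next hInv ?_ ?_
        · intro p
          rw [← hgrid, mA p.1 p.2, Prod.mk.eta]
        · intro p
          rw [hmem p, mem_dotFresh]
      have hdlt : dots (markAll g (dotFresh rows cols g)) < N := by
        obtain ⟨p, l, hpl⟩ := List.exists_cons_of_ne_nil hF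
        have hlt := dots_markAll_lt (g := g) (p := p) l
          (mem_dotFresh_dot (hpl ▸ List.mem_cons_self ..))
        rw [← hpl] at hlt
        omega
      have hend := ih (markAll g (dotFresh rows cols g)) (pAll rows cols g q).2
        (e - ((dotFresh rows cols g).length : Int)) (t + 1) hdlt hInv2
      rw [hpass, show ([] : List (Nat × Nat)) ++ (pAll rows cols g q).2
        = (pAll rows cols g q).2 from rfl, if_neg hP2ne, hgrid, hlen,
        show max t (t + 1) = t + 1 by omega, hend, bloop_step e t hF]

def bCells (rows cols : Nat) (g : List (List String)) : List (Nat × Nat) :=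
  (List.range rows).flatMap (fun r =>
    ((List.range cols).filter (fun c => getC g r c == "B")).map (fun c => (r, c)))

lemma fill_spec (g : List (List String)) (rows cols : Nat) :
    fillA g rows cols = (stamp 0 (bCells rows cols g), countDots rows cols g) := by
  have inner : ∀ (r : Nat) (cs : List Nat) (st : List (Nat × Nat × Nat) × Int),
      cs.foldl (fun st c =>
        if getC g r c = "B" then (st.1 ++ [(r, c, 0)], st.2)
        else if getC g r c = "." then (st.1, st.2 + 1) else st) st
      = (st.1 ++ stamp 0 ((cs.filter (fun c => getC g r c == "B")).map (fun c => (r, c))),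
         st.2 + (((cs.filter (fun c => getC g r c == ".")).length : Int))) := by
    intro r cs
    induction cs with
    | nil => intro st; simp [stamp]
    | cons c cs ihc =>
      intro st
      rw [List.foldl_cons]
      by_cases hB : getC g r c = "B"
      · rw [if_pos hB, ihc]
        simp [stamp, hB]
      · rw [if_neg hB]
        by_cases hD : getC g r c = "."
        · rw [if_pos hD, ihc]
          have hBne : (getC g r c == "B") = false := by simp [hB]
          simp [hD]
          ring
        · rw [if_neg hD, ihc]
          have hBne : (getC g r c == "B") = false := by simp [hB]
          have hDne : (getC g r c == ".") = false := by simp [hD]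
          simp [hBne, hDne]
  have outer : ∀ (rs : List Nat) (st : List (Nat × Nat × Nat) × Int),
      rs.foldl (fun st r => (List.range cols).foldl (fun st c =>
        if getC g r c = "B" then (st.1 ++ [(r, c, 0)], st.2)
        else if getC g r c = "." then (st.1, st.2 + 1) else st) st) st
      = (st.1 ++ stamp 0 (rs.flatMap (fun r =>
           ((List.range cols).filter (fun c => getC g r c == "B")).map (fun c => (r, c)))),
         st.2 + (((rs.flatMap (fun r =>
           (List.range cols).filter (fun c => getC g r c == "."))).length : Int))) := by
    intro rs
    induction rs with
    | nil => intro st; simp [stamp]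
    | cons r rs ihr =>
      intro st
      rw [List.foldl_cons, inner r, ihr]
      refine Prod.ext ?_ ?_ <;> dsimp only
      · rw [List.flatMap_cons, stamp_append, List.append_assoc]
      · rw [List.flatMap_cons]
        push_cast [List.length_append]
        ring
  unfold fillA bCells countDots
  rw [outer]
  simp

lemma mem_bCells {rows cols : Nat} {g : List (List String)} {p : Nat × Nat} :
    p ∈ bCells rows cols g ↔ inWin rows cols p ∧ getC g p.1 p.2 = "B" := by
  simp only [bCells, List.mem_flatMap, List.mem_map, List.mem_filter, List.mem_range]
  constructor
  · rintro ⟨r, hr, c, ⟨hc, hB⟩, rfl⟩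
    exact ⟨⟨hr, hc⟩, by simpa using hB⟩
  · rintro ⟨⟨hr, hc⟩, hB⟩
    exact ⟨p.1, hr, p.2, ⟨hc, by simpa using hB⟩, Prod.mk.eta⟩

lemma InvQ_init (rows cols : Nat) (g : List (List String)) :
    InvQ rows cols g (bCells rows cols g) := by
  constructor
  · intro u hu
    have h := mem_bCells.mp hu
    exact ⟨h.2, h.1⟩
  · intro p hdot hwin ⟨b, hbw, hadj, hB⟩
    exact ⟨b, mem_bCells.mpr ⟨hbw, hB⟩, adjP_symm hadj⟩

-- ===== VERDICT (by name: the statement is the Claim_ definition above) =====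
theorem min_hours_to_infect_spec : Claim_equal_min_hours_to_infect := by
  intro grid _ _
  unfold Spec_min_hours_to_infect min_hours_to_infect min_hours_to_infect_alt
  simp only [fill_spec]
  exact main_ind grid.length (grid.headD []).length (dots grid + 1) grid _ _ 0
    (by omega) (InvQ_init _ _ _)
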